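-- pv_equiv track=rewrite | github.com/echen1668/451Code | NFAandDFA.py | automatonM4
-- ===== SOURCE A (Python) =====
-- def automatonM4(InputString): #function for M4
--     EndState = 'q0' #start state
--     for i in InputString:
--         #Transition function
--         if EndState == 'q0' and i == '0':
--             EndState = 'q0'
--         elif EndState == 'q0' and i == '1':
--             EndState = 'q1'
--         elif EndState == 'q1' and i == '0':
--             EndState = 'q1'
--         elif EndState == 'q1' and i == '1':
--             EndState = 'q0'
--     if EndState in ['q1']:
--         AcceptFlag = True
--     else:
--         AcceptFlag = False
--     return AcceptFlag, EndState
-- ===== SOURCE B (Python) =====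
-- def automatonM4(InputString):
--     # Only '1' toggles the state, so the end state is just the parity of the '1' count.
--     parity = InputString.count('1') % 2
--     EndState = 'q1' if parity == 1 else 'q0'
--     return parity == 1, EndState
-- ===== Notes on version B (the rewrite author's own statement) =====
-- stated objective: simpler
-- what changed: Replaces the explicit DFA transition loop with a closed form: the parity of the count of ones (via str.count) determines the end state and acceptance.
import Mathlib
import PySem

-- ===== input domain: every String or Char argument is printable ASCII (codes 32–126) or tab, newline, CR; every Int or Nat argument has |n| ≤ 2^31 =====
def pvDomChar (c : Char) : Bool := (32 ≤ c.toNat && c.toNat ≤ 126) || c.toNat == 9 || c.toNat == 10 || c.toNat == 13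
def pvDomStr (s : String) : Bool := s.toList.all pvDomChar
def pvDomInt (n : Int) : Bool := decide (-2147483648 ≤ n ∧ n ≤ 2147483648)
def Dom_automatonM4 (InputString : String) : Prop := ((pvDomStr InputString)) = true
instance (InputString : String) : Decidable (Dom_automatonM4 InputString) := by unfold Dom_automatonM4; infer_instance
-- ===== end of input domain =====

-- B replaces the explicit DFA transition loop with the parity of the '1' count (simpler closed form).

-- ===== PORT A =====
def automatonM4 (InputString : String) : Bool × String :=
  let EndState := "q0"
  let EndState := InputString.toList.foldl (fun EndState i =>
    if EndState == "q0" && i == '0' then "q0"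
    else if EndState == "q0" && i == '1' then "q1"
    else if EndState == "q1" && i == '0' then "q1"
    else if EndState == "q1" && i == '1' then "q0"
    else EndState) EndState
  let AcceptFlag := if ["q1"].contains EndState then true else false
  (AcceptFlag, EndState)

-- ===== PORT B =====
def automatonM4_alt (InputString : String) : Bool × String :=
  let parity := PySem.Str.count InputString "1" % 2
  let EndState := if parity == 1 then "q1" else "q0"
  (parity == 1, EndState)

-- ===== PRECONDITION & SPEC =====
def Spec_automatonM4 (InputString : String) (out : Bool × String) : Prop := out = automatonM4_alt InputString
instance (InputString : String) (out : Bool × String) : Decidable (Spec_automatonM4 InputString out) := by unfold Spec_automatonM4; infer_instance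

-- ===== CLAIM (what is proved, stated in full; the proofs are below) =====
def Claim_equal_automatonM4 : Prop := ∀ (InputString : String), Dom_automatonM4 InputString → Spec_automatonM4 InputString (automatonM4 InputString)

-- ===== LEMMAS AND PROOFS =====

-- str.count with a single-character needle counts character occurrences.
theorem count_go_one (l : List Char) : ∀ (fuel acc : Nat), l.length ≤ fuel →
    PySem.Chars.count.go ['1'] fuel l acc = acc + l.count '1' := by
  induction l with
  | nil => intro fuel acc _; cases fuel <;> simp [PySem.Chars.count.go]
  | cons h t ih =>
    intro fuel acc hle
    cases fuel with
    | zero => simp at hle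
    | succ n =>
      by_cases h1 : h = '1'
      · subst h1
        simp [PySem.Chars.count.go, List.isPrefixOf, ih n (acc + 1) (by simpa using hle)]
        omega
      · simp only [PySem.Chars.count.go, List.isPrefixOf]
        rw [if_neg (by simp; exact fun he => h1 he.symm), ih n acc (by simpa using hle)]
        simp [h1]

theorem str_count_one (s : String) : PySem.Str.count s "1" = s.toList.count '1' := by
  simp only [PySem.Str.count_eq]
  show PySem.Chars.count s.toList ['1'] = s.toList.count '1'
  simp only [PySem.Chars.count]
  rw [if_neg (by simp)]
  rw [count_go_one s.toList s.toList.length 0 le_rfl]; simp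

-- the A-side transition function
def pvStep (s : String) (i : Char) : String :=
  if s == "q0" && i == '0' then "q0"
  else if s == "q0" && i == '1' then "q1"
  else if s == "q1" && i == '0' then "q1"
  else if s == "q1" && i == '1' then "q0"
  else s

theorem foldl_parity (l : List Char) :
    l.foldl pvStep "q0" = (if l.count '1' % 2 == 1 then "q1" else "q0") ∧
    l.foldl pvStep "q1" = (if l.count '1' % 2 == 1 then "q0" else "q1") := by
  induction l with
  | nil => simp
  | cons h t ih =>
    by_cases h1 : h = '1'
    · subst h1
      constructor
      · show List.foldl pvStep (pvStep "q0" '1') t = _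
        rw [show pvStep "q0" '1' = "q1" from rfl, ih.2]
        simp only [List.count_cons]
        rcases Nat.even_or_odd (t.count '1') with he | ho
        · simp [Nat.add_mod, Nat.even_iff.mp he]
        · simp [Nat.add_mod, Nat.odd_iff.mp ho]
      · show List.foldl pvStep (pvStep "q1" '1') t = _
        rw [show pvStep "q1" '1' = "q0" from rfl, ih.1]
        simp only [List.count_cons]
        rcases Nat.even_or_odd (t.count '1') with he | ho
        · simp [Nat.add_mod, Nat.even_iff.mp he]
        · simp [Nat.add_mod, Nat.odd_iff.mp ho]
    · have h0 : pvStep "q0" h = "q0" := by simp [pvStep, h1]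
      have h0' : pvStep "q1" h = "q1" := by simp [pvStep, h1]
      constructor
      · show List.foldl pvStep (pvStep "q0" h) t = _
        rw [h0, ih.1]; simp [h1]
      · show List.foldl pvStep (pvStep "q1" h) t = _
        rw [h0', ih.2]; simp [h1]

-- ===== VERDICT (by name: the statement is the Claim_ definition above) =====
theorem automatonM4_spec : Claim_equal_automatonM4 := by
  intro s _
  unfold Spec_automatonM4 automatonM4 automatonM4_alt
  have hf : s.toList.foldl (fun EndState i =>
      if EndState == "q0" && i == '0' then "q0"
      else if EndState == "q0" && i == '1' then "q1"
      else if EndState == "q1" && i == '0' then "q1"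
      else if EndState == "q1" && i == '1' then "q0"
      else EndState) "q0" = s.toList.foldl pvStep "q0" := rfl
  simp only [hf, (foldl_parity s.toList).1, str_count_one]
  by_cases hp : s.toList.count '1' % 2 = 1 <;> simp [hp]
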